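-- pv_equiv track=rewrite | github.com/dhdbv-cbs/genericagent-launcher | launcher_core.py | _fmt_dict
-- ===== SOURCE A (Python) =====
-- _FIELD_ORDER = [
--     "name",
--     "apikey",
--     "apibase",
--     "model",
--     "api_mode",
--     "fake_cc_system_prompt",
--     "thinking_type",
--     "thinking_budget_tokens",
--     "reasoning_effort",
--     "temperature",
--     "max_tokens",
--     "stream",
--     "max_retries",
--     "connect_timeout",
--     "read_timeout",
--     "context_win",
--     "proxy",
--     "llm_nos",
--     "base_delay",
--     "spring_back",
-- ]
--
-- def _ordered_items(d):
--     idx = {k: i for i, k in enumerate(_FIELD_ORDER)}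
--     return sorted(d.items(), key=lambda kv: (idx.get(kv[0], 999), kv[0]))
--
-- def _fmt_dict(d):
--     if not d:
--         return "{}"
--     lines = ["{"]
--     for k, v in _ordered_items(d):
--         lines.append(f"    {k!r}: {v!r},")
--     lines.append("}")
--     return "\n".join(lines)
-- ===== SOURCE B (Python) =====
-- # B: scan the fixed _FIELD_ORDER list for known keys, then sort only the unknown keys —
-- # no global sort of the items.  Same output as A.
-- _FIELD_ORDER = [
--     "name",
--     "apikey",
--     "apibase",
--     "model",
--     "api_mode",
--     "fake_cc_system_prompt",
--     "thinking_type",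
--     "thinking_budget_tokens",
--     "reasoning_effort",
--     "temperature",
--     "max_tokens",
--     "stream",
--     "max_retries",
--     "connect_timeout",
--     "read_timeout",
--     "context_win",
--     "proxy",
--     "llm_nos",
--     "base_delay",
--     "spring_back",
-- ]
--
-- def _fmt_dict(d):
--     if not d:
--         return "{}"
--     out = ["{"]
--     for k in _FIELD_ORDER:
--         if k in d:
--             out.append(f"    {k!r}: {d[k]!r},")
--     for k in sorted(k for k in d if k not in _FIELD_ORDER):
--         out.append(f"    {k!r}: {d[k]!r},")
--     out.append("}")
--     return "\n".join(out)
-- ===== Notes on version B (the rewrite author's own statement) =====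
-- stated objective: alternative
-- what changed: A sorts all items once with a (rank, key) tuple key; B instead scans the fixed _FIELD_ORDER list emitting present known keys in that order, then sorts only the unknown keys and appends them.
import Mathlib
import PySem

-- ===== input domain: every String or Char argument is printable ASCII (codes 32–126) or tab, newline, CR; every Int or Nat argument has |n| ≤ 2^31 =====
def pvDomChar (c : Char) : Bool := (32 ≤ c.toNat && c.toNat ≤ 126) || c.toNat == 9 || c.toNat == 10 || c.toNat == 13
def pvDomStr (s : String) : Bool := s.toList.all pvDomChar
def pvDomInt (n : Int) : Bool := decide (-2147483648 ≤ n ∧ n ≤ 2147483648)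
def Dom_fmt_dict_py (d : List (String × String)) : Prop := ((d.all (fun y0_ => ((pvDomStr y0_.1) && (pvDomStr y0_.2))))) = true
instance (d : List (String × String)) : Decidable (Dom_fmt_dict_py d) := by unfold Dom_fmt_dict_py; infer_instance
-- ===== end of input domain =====

-- B replaces A's single full sort of all items with a scan of the fixed field-order list
-- plus a sort of only the unknown keys; same return value (alternative decomposition).

-- shared module constant _FIELD_ORDER
def pvFieldOrder : List String :=
  ["name", "apikey", "apibase", "model", "api_mode", "fake_cc_system_prompt",
   "thinking_type", "thinking_budget_tokens", "reasoning_effort", "temperature",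
   "max_tokens", "stream", "max_retries", "connect_timeout", "read_timeout",
   "context_win", "proxy", "llm_nos", "base_delay", "spring_back"]

-- port of Python's built-in repr() for str, exact on the domain's characters
-- (printable ASCII plus tab/newline/CR): quote choice and escaping as CPython does
def pvReprChar (q : Char) (c : Char) : List Char :=
  if c = '\\' then ['\\', '\\']
  else if c = q then ['\\', q]
  else if c = '\n' then ['\\', 'n']
  else if c = '\r' then ['\\', 'r']
  else if c = '\t' then ['\\', 't']
  else [c]

def pyReprStr (s : String) : String :=
  let cs := s.toList
  let q : Char := if '\'' ∈ cs ∧ ¬ '"' ∈ cs then '"' else '\''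
  String.ofList (q :: (cs.flatMap (pvReprChar q) ++ [q]))

-- the f-string "    {k!r}: {v!r}," (shared by both Pythons)
def pvFmtLine (kv : String × String) : String :=
  "    " ++ pyReprStr kv.1 ++ ": " ++ pyReprStr kv.2 ++ ","

-- ===== PORT A =====
-- idx = {k: i for i, k in enumerate(_FIELD_ORDER)}
def pvIdx : PySem.Dict String Int :=
  PySem.Dict.ofList ((PySem.List.enumerate pvFieldOrder).map (fun p => (p.2, p.1)))

-- sorted(d.items(), key=lambda kv: (idx.get(kv[0], 999), kv[0]))
def pvOrderedItems (dd : PySem.Dict String String) : List (String × String) :=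
  PySem.List.sorted2 dd.items (fun kv => pvIdx.getD kv.1 999) (fun kv => kv.1)

def fmt_dict_py (d : List (String × String)) : String :=
  if d = [] then "{}"
  else
    let dd := PySem.Dict.ofList d
    let lines := ["{"] ++ (pvOrderedItems dd).map pvFmtLine ++ ["}"]
    PySem.Str.join "\n" lines

-- ===== PORT B =====
def fmt_dict_py_alt (d : List (String × String)) : String :=
  if d = [] then "{}"
  else
    let dd := PySem.Dict.ofList d
    -- for k in _FIELD_ORDER: if k in d: out.append(f"    {k!r}: {d[k]!r},")
    let out1 := pvFieldOrder.foldl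
      (fun acc k => if dd.contains k then acc ++ [pvFmtLine (k, dd.getD k "")] else acc) ["{"]
    -- sorted(k for k in d if k not in _FIELD_ORDER)
    let extras := PySem.List.sorted (dd.keys.filter (fun k => !(pvFieldOrder.contains k))) (fun x => x)
    let out2 := extras.foldl (fun acc k => acc ++ [pvFmtLine (k, dd.getD k "")]) out1
    PySem.Str.join "\n" (out2 ++ ["}"])

-- ===== PRECONDITION & SPEC =====
def Spec_fmt_dict_py (d : List (String × String)) (out : String) : Prop := out = fmt_dict_py_alt d
instance (d : List (String × String)) (out : String) : Decidable (Spec_fmt_dict_py d out) := by unfold Spec_fmt_dict_py; infer_instance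

-- ===== CLAIM (what is proved, stated in full; the proofs are below) =====
def Claim_equal_fmt_dict_py : Prop := ∀ (d : List (String × String)), Dom_fmt_dict_py d → Spec_fmt_dict_py d (fmt_dict_py d)

-- ===== LEMMAS AND PROOFS =====

lemma flatMap_single {α β : Type} (f : α → β) (l : List α) :
    l.flatMap (fun x => [f x]) = l.map f := by
  induction l with
  | nil => rfl
  | cons x t ih => simp [ih]

-- Python's tuple key (k1 x, k2 x) is the lexicographic order on pairs
lemma sorted2_eq_sorted_lex {α : Type} (xs : List α) (k1 : α → Int) (k2 : α → String) :
    PySem.List.sorted2 xs k1 k2 = PySem.List.sorted xs (fun x => toLex (k1 x, k2 x)) := by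
  have hb : (fun (a b : α) => decide (k1 a < k1 b) || (!decide (k1 b < k1 a) && decide (k2 a < k2 b)))
      = (fun a b => decide ((toLex (k1 a, k2 a) : Int ×ₗ String) < toLex (k1 b, k2 b))) := by
    funext a b
    rcases lt_trichotomy (k1 a) (k1 b) with h | h | h
    · simp [h, Prod.Lex.toLex_lt_toLex]
    · simp [h, Prod.Lex.toLex_lt_toLex]
    · simp [h, not_lt_of_gt h, ne_of_gt h, Prod.Lex.toLex_lt_toLex]
  show xs.foldl (fun acc x => PySem.List.insertBy _ x acc) [] = xs.foldl (fun acc x => PySem.List.insertBy _ x acc) []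
  rw [hb]

lemma pvIdx_keys : pvIdx.keys = pvFieldOrder := by decide

lemma pvIdx_not_mem {k : String} (h : ¬ k ∈ pvFieldOrder) : pvIdx.getD k 999 = 999 := by
  apply PySem.Dict.getD_of_not_contains
  rw [PySem.Dict.contains_eq_decide_mem_keys, pvIdx_keys]
  simpa using h

lemma pvIdx_lt : ∀ k ∈ pvFieldOrder, pvIdx.getD k 999 < 999 := by decide

lemma pvIdx_mono : pvFieldOrder.Pairwise (fun a b => pvIdx.getD a 999 < pvIdx.getD b 999) := by decide

-- the ordered items A sorts are exactly B's known part followed by B's sorted extras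
lemma ordered_items_eq (dd : PySem.Dict String String) (hnd : dd.keys.Nodup) :
    pvOrderedItems dd =
      ((pvFieldOrder.filter (fun k => dd.contains k)) ++
        PySem.List.sorted (dd.keys.filter (fun k => !(pvFieldOrder.contains k))) (fun x => x)).map
        (fun k => (k, dd.getD k "")) := by
  set extras := PySem.List.sorted (dd.keys.filter (fun k => !(pvFieldOrder.contains k))) (fun x => x) with hex
  have hextras_perm : extras.Perm (dd.keys.filter (fun k => !(pvFieldOrder.contains k))) :=
    PySem.List.sorted_perm _ _ _
  have hextras_mem : ∀ k ∈ extras, k ∈ dd.keys ∧ ¬ k ∈ pvFieldOrder := by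
    intro k hk
    have := hextras_perm.mem_iff.mp hk
    simpa using List.mem_filter.mp this
  have hknown_mem : ∀ k ∈ pvFieldOrder.filter (fun k => dd.contains k), k ∈ pvFieldOrder := by
    intro k hk; exact (List.mem_filter.mp hk).1
  unfold pvOrderedItems
  rw [sorted2_eq_sorted_lex]
  apply PySem.List.sorted_eq_of_perm_of_pairwise_lt
  · -- permutation
    rw [PySem.Dict.items_eq_map_keys dd hnd ""]
    apply List.Perm.map
    have h1 : (pvFieldOrder.filter (fun k => dd.contains k)).Perm
        (dd.keys.filter (fun k => pvFieldOrder.contains k)) := by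
      rw [List.perm_ext_iff_of_nodup ((by decide : pvFieldOrder.Nodup).filter _) (hnd.filter _)]
      intro a
      simp only [List.mem_filter, PySem.Dict.contains_eq_decide_mem_keys, List.contains_iff_mem,
        decide_eq_true_eq]
      tauto
    exact (h1.append hextras_perm).trans
      (List.filter_append_perm (fun k => pvFieldOrder.contains k) dd.keys)
  · -- pairwise strictly increasing in the lex key
    rw [List.map_append, List.pairwise_append]
    refine ⟨?_, ?_, ?_⟩
    · -- known part: strictly increasing first components along _FIELD_ORDER
      rw [List.pairwise_map]
      refine List.Pairwise.imp ?_ (List.Pairwise.sublist List.filter_sublist pvIdx_mono)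
      intro a b hab
      exact Prod.Lex.toLex_lt_toLex.mpr (Or.inl hab)
    · -- extras: first components all 999, second components strictly increasing
      rw [List.pairwise_map]
      have hle : extras.Pairwise (fun a b => a ≤ b) := by
        rw [hex]; exact PySem.List.sorted_pairwise _ (fun x => x)
      have hne : extras.Pairwise (fun a b => a ≠ b) :=
        ((hnd.filter _).perm hextras_perm.symm)
      refine List.Pairwise.imp_of_mem ?_ (hle.and hne)
      rintro a b ha hb ⟨h1, h2⟩
      refine Prod.Lex.toLex_lt_toLex.mpr (Or.inr ⟨?_, lt_of_le_of_ne h1 h2⟩)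
      rw [pvIdx_not_mem (hextras_mem a ha).2, pvIdx_not_mem (hextras_mem b hb).2]
    · -- every known key sorts before every extra key
      rintro x hx y hy
      simp only [List.mem_map] at hx hy
      obtain ⟨a, ha, rfl⟩ := hx
      obtain ⟨b, hb, rfl⟩ := hy
      refine Prod.Lex.toLex_lt_toLex.mpr (Or.inl ?_)
      rw [pvIdx_not_mem (hextras_mem b hb).2]
      exact pvIdx_lt a (hknown_mem a ha)

-- ===== VERDICT (by name: the statement is the Claim_ definition above) =====
theorem fmt_dict_py_spec : Claim_equal_fmt_dict_py := by
  intro d _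
  unfold Spec_fmt_dict_py fmt_dict_py fmt_dict_py_alt
  by_cases hd : d = []
  · simp [hd]
  · simp only [if_neg hd]
    rw [ordered_items_eq _ (PySem.Dict.nodup_keys_ofList d)]
    rw [PySem.List.foldl_append_if, PySem.List.foldl_append_eq_flatMap]
    congr 1
    simp [List.map_append, List.map_map, Function.comp_def, flatMap_single]
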